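-- pv_equiv track=rewrite | github.com/xb030216/DeepSLA | baseline_model/unixcoder_baseline.py | encode_token_labels
-- ===== SOURCE A (Python) =====
-- import bisect
--
-- def encode_token_labels(code, line_labels, offsets):
--     line_starts = []
--     pos = 0
--     split_lines = code.split("\n")
--     for line in split_lines:
--         line_starts.append(pos)
--         pos += len(line) + 1
--
--     token_labels = []
--
--     for (start, end) in offsets:
--         if start == 0 and end == 0:
--             token_labels.append(-100)
--             continue
--         line_idx = bisect.bisect_right(line_starts, start) - 1
--         if 0 <= line_idx < len(line_labels):
--             token_labels.append(int(line_labels[line_idx]))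
--         else:
--             token_labels.append(0)
--     return token_labels
-- ===== SOURCE B (Python) =====
-- def encode_token_labels(code, line_labels, offsets):
--     # Dense position->line lookup table built once; each offset is answered by direct indexing (clamped) instead of bisect.
--     char_to_line = []
--     for i, line in enumerate(code.split("\n")):
--         char_to_line.extend([i] * (len(line) + 1))
--     n = len(line_labels)
--     out = []
--     for start, end in offsets:
--         if start == 0 and end == 0:
--             out.append(-100)
--         elif start >= 0:
--             li = char_to_line[min(start, len(char_to_line) - 1)]
--             out.append(int(line_labels[li]) if li < n else 0)
--         else:
--             out.append(0)
--     return out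
-- ===== Notes on version B (the rewrite author's own statement) =====
-- stated objective: alternative
-- what changed: B replaces the per-token bisect over the accumulated line-start list with a dense char-position-to-line lookup table built once from the split lines; it trades the binary search for direct table indexing with explicit clamping and sign handling.
import Mathlib
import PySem

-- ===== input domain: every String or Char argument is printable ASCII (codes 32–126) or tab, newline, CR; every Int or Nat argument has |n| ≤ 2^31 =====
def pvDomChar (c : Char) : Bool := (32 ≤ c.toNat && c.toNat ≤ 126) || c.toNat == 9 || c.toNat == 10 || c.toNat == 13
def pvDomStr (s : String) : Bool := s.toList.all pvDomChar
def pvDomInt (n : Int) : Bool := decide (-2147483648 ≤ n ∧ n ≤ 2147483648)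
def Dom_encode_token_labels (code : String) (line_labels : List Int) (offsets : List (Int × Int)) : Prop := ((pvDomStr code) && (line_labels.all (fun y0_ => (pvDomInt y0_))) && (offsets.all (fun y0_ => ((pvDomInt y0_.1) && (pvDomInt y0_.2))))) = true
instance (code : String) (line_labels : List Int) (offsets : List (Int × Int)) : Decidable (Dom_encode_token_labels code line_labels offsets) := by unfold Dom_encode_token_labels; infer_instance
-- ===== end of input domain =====

-- B replaces the per-offset bisect with a dense position→line table built once and indexed directly; equivalence proved below.

-- ===== PORT A =====
-- bisect.bisect_right xs x for a SORTED xs equals the number of elements ≤ x;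
-- line_starts is strictly increasing, so this is exact here.
def pyBisectRight (xs : List Int) (x : Int) : Int :=
  ((xs.countP (fun a => decide (a ≤ x))) : Int)

def encode_token_labels (code : String) (line_labels : List Int) (offsets : List (Int × Int)) : List Int :=
  let split_lines := (PySem.Str.split? code "\n").getD []   -- sep "\n" ≠ "" so split? is always `some`
  let st := split_lines.foldl
      (fun (acc : List Int × Int) line => (acc.1 ++ [acc.2], acc.2 + PySem.Str.len line + 1)) ([], 0)
  let line_starts := st.1
  offsets.foldl (fun token_labels se =>
    if se.1 = 0 ∧ se.2 = 0 then token_labels ++ [(-100 : Int)]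
    else
      let line_idx := pyBisectRight line_starts se.1 - 1
      if 0 ≤ line_idx ∧ line_idx < (line_labels.length : Int) then
        token_labels ++ [PySem.List.pyGetD line_labels line_idx 0]
      else token_labels ++ [(0 : Int)]) []

-- ===== PORT B =====
def encode_token_labels_alt (code : String) (line_labels : List Int) (offsets : List (Int × Int)) : List Int :=
  let char_to_line :=
    (PySem.List.enumerate ((PySem.Str.split? code "\n").getD [])).foldl
      (fun (acc : List Int) p => acc ++ List.replicate (PySem.Str.len p.2 + 1).toNat p.1) []
  let n := (line_labels.length : Int)
  offsets.foldl (fun out se =>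
    if se.1 = 0 ∧ se.2 = 0 then out ++ [(-100 : Int)]
    else if 0 ≤ se.1 then
      let li := PySem.List.pyGetD char_to_line (min se.1 (((char_to_line.length : Int)) - 1)) 0
      out ++ [if li < n then PySem.List.pyGetD line_labels li 0 else (0 : Int)]
    else out ++ [(0 : Int)]) []

-- ===== PRECONDITION & SPEC =====
def Spec_encode_token_labels (code : String) (line_labels : List Int) (offsets : List (Int × Int)) (out : List Int) : Prop := out = encode_token_labels_alt code line_labels offsets
instance (code : String) (line_labels : List Int) (offsets : List (Int × Int)) (out : List Int) : Decidable (Spec_encode_token_labels code line_labels offsets out) := by unfold Spec_encode_token_labels; infer_instance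

-- ===== CLAIM (what is proved, stated in full; the proofs are below) =====
def Claim_equal_encode_token_labels : Prop := ∀ (code : String) (line_labels : List Int) (offsets : List (Int × Int)), Dom_encode_token_labels code line_labels offsets → Spec_encode_token_labels code line_labels offsets (encode_token_labels code line_labels offsets)


-- ===== LEMMAS AND PROOFS =====

-- reference structures over the list of split lines
def startsFrom (p : Int) : List String → List Int
  | [] => []
  | l :: ls => p :: startsFrom (p + PySem.Str.len l + 1) ls

def sumLens : List String → Int
  | [] => 0
  | l :: ls => PySem.Str.len l + 1 + sumLens ls

def ctlFrom (i : Int) : List String → List Int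
  | [] => []
  | l :: ls => List.replicate (PySem.Str.len l + 1).toNat i ++ ctlFrom (i + 1) ls

def lineOf : List String → Int → Int
  | [], _ => 0
  | [_], _ => 0
  | l :: ls, s => if s ≤ PySem.Str.len l then 0 else 1 + lineOf ls (s - PySem.Str.len l - 1)

theorem startsFrom_cons (p : Int) (l : String) (ls : List String) :
    startsFrom p (l :: ls) = p :: startsFrom (p + PySem.Str.len l + 1) ls := rfl

theorem ctlFrom_cons (i : Int) (l : String) (ls : List String) :
    ctlFrom i (l :: ls) = List.replicate (PySem.Str.len l + 1).toNat i ++ ctlFrom (i + 1) ls := rfl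

theorem lineOf_single (l : String) (s : Int) : lineOf [l] s = 0 := rfl

theorem lineOf_cons₂ (l l' : String) (t : List String) (s : Int) :
    lineOf (l :: l' :: t) s =
      if s ≤ PySem.Str.len l then 0 else 1 + lineOf (l' :: t) (s - PySem.Str.len l - 1) := rfl

theorem str_len_nonneg (l : String) : 0 ≤ PySem.Str.len l := by simp [PySem.Str.len_eq]

theorem lineOf_nonneg (ls : List String) (s : Int) : 0 ≤ lineOf ls s := by
  induction ls generalizing s with
  | nil => simp [lineOf]
  | cons l ls ih =>
    cases ls with
    | nil => simp [lineOf_single]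
    | cons l' t =>
      rw [lineOf_cons₂]
      split
      · omega
      · have := ih (s - PySem.Str.len l - 1)
        omega

theorem go_ne_nil (sep : List Char) : ∀ (fuel : Nat) (l cur : List Char) (acc : List (List Char)),
    PySem.Chars.splitOn.go sep fuel l cur acc ≠ [] := by
  intro fuel
  induction fuel with
  | zero =>
    intro l cur acc
    rw [PySem.Chars.splitOn.go.eq_def]
    simp
  | succ f ih =>
    intro l cur acc
    rw [PySem.Chars.splitOn.go.eq_def]
    cases l with
    | nil => simp
    | cons c rest =>
      dsimp only
      split <;> apply ih

theorem split_ne_nil (code : String) : ((PySem.Str.split? code "\n").getD []) ≠ [] := by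
  intro hcon
  have h : PySem.Chars.split? code.toList "\n".toList
      = some (PySem.Chars.splitOn code.toList "\n".toList) := by
    simp [PySem.Chars.split?]
  rw [PySem.Str.split?, h] at hcon
  simp [PySem.Chars.splitOn] at hcon
  exact go_ne_nil _ _ _ _ _ hcon

-- the fold of port A builds startsFrom
theorem foldl_starts (ls : List String) : ∀ (acc : List Int) (p : Int),
    ls.foldl (fun (a : List Int × Int) line => (a.1 ++ [a.2], a.2 + PySem.Str.len line + 1)) (acc, p)
      = (acc ++ startsFrom p ls, p + sumLens ls) := by
  induction ls with
  | nil => intro acc p; simp [startsFrom, sumLens]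
  | cons l ls ih =>
    intro acc p
    rw [List.foldl_cons, ih, startsFrom_cons, Prod.mk.injEq]
    refine ⟨by simp, by simp [sumLens]; ring⟩

-- the fold of port B builds ctlFrom
theorem foldl_ctl (ls : List String) : ∀ (acc : List Int) (i : Int),
    (PySem.List.enumerate ls i).foldl
        (fun (a : List Int) p => a ++ List.replicate (PySem.Str.len p.2 + 1).toNat p.1) acc
      = acc ++ ctlFrom i ls := by
  induction ls with
  | nil => intro acc i; simp [ctlFrom, PySem.List.enumerate_nil]
  | cons l ls ih =>
    intro acc i
    rw [PySem.List.enumerate_cons, List.foldl_cons, ih, ctlFrom_cons, List.append_assoc]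

theorem countP_startsFrom_shift (ls : List String) : ∀ (p s : Int),
    (startsFrom p ls).countP (fun a => decide (a ≤ s))
      = (startsFrom 0 ls).countP (fun a => decide (a ≤ s - p)) := by
  induction ls with
  | nil => intro p s; rfl
  | cons l ls ih =>
    intro p s
    rw [startsFrom_cons, startsFrom_cons, List.countP_cons, List.countP_cons,
        ih (p + PySem.Str.len l + 1) s, ih (0 + PySem.Str.len l + 1) (s - p)]
    have h1 : s - (p + PySem.Str.len l + 1) = s - p - (0 + PySem.Str.len l + 1) := by ring
    rw [h1]
    congr 1
    by_cases h : p ≤ s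
    · simp [h]
    · simp [h]

theorem countP_startsFrom_neg (ls : List String) : ∀ (s : Int), s < 0 →
    (startsFrom 0 ls).countP (fun a => decide (a ≤ s)) = 0 := by
  induction ls with
  | nil => intro s _; rfl
  | cons l ls ih =>
    intro s hs
    have hlen := str_len_nonneg l
    rw [startsFrom_cons, List.countP_cons,
        countP_startsFrom_shift ls (0 + PySem.Str.len l + 1) s, ih _ (by omega)]
    have : ¬ ((0:Int) ≤ s) := by omega
    simp [this]

theorem countP_startsFrom_eq_lineOf (ls : List String) : ∀ (s : Int), ls ≠ [] → 0 ≤ s →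
    ((startsFrom 0 ls).countP (fun a => decide (a ≤ s)) : Int) = lineOf ls s + 1 := by
  induction ls with
  | nil => intro s h _; exact absurd rfl h
  | cons l ls ih =>
    intro s _ hs
    have hlen := str_len_nonneg l
    cases ls with
    | nil =>
      rw [startsFrom_cons, List.countP_cons, lineOf_single]
      simp [startsFrom, hs]
    | cons l' t =>
      rw [startsFrom_cons, List.countP_cons,
          countP_startsFrom_shift (l' :: t) (0 + PySem.Str.len l + 1) s, lineOf_cons₂]
      by_cases h : s ≤ PySem.Str.len l
      · rw [countP_startsFrom_neg (l' :: t) _ (by omega), if_pos h]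
        simp [hs]
      · rw [if_neg h]
        push_cast [hs]
        rw [ih (s - (0 + PySem.Str.len l + 1)) (by simp) (by omega)]
        have heq : s - (0 + PySem.Str.len l + 1) = s - PySem.Str.len l - 1 := by ring
        rw [heq]
        simp
        omega

theorem ctlFrom_length_pos (ls : List String) (i : Int) (h : ls ≠ []) :
    0 < (ctlFrom i ls).length := by
  cases ls with
  | nil => exact absurd rfl h
  | cons l t =>
    have hlen := str_len_nonneg l
    rw [ctlFrom_cons]
    simp

theorem ctl_lookup (ls : List String) : ∀ (i s : Int), ls ≠ [] → 0 ≤ s →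
    PySem.List.pyGetD (ctlFrom i ls) (min s (((ctlFrom i ls).length : Int) - 1)) 0
      = i + lineOf ls s := by
  induction ls with
  | nil => intro i s h _; exact absurd rfl h
  | cons l ls ih =>
    intro i s _ hs
    obtain ⟨n, hn⟩ : ∃ n : Nat, PySem.Str.len l = (n : Int) :=
      ⟨l.toList.length, by simp [PySem.Str.len_eq]⟩
    have htn : (PySem.Str.len l + 1).toNat = n + 1 := by omega
    cases ls with
    | nil =>
      rw [ctlFrom_cons, lineOf_single, add_zero]
      simp only [ctlFrom, List.append_nil, htn]
      have hL : ((List.replicate (n + 1) i).length : Int) = (n : Int) + 1 := by simp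
      rw [hL]
      have h0 : (0:Int) ≤ min s ((n:Int) + 1 - 1) := by omega
      have h1 : min s ((n:Int) + 1 - 1) < ((List.replicate (n + 1) i).length : Int) := by
        simp
      rw [PySem.List.pyGetD_eq_getElem _ _ h0 h1, List.getElem_replicate]
    | cons l' t =>
      have hne : (l' :: t : List String) ≠ [] := by simp
      have hpos : 0 < (ctlFrom (i + 1) (l' :: t)).length := ctlFrom_length_pos _ _ hne
      rw [ctlFrom_cons, lineOf_cons₂, htn]
      set B := ctlFrom (i + 1) (l' :: t) with hB
      have hlenT : ((List.replicate (n + 1) i ++ B).length : Int)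
          = (n:Int) + 1 + (B.length : Int) := by simp
      by_cases h : s ≤ PySem.Str.len l
      · have hmin : min s (((List.replicate (n + 1) i ++ B).length : Int) - 1) = s := by
          rw [hlenT]; omega
        rw [hmin, PySem.List.pyGetD_eq_getElem _ _ hs (by rw [hlenT]; omega)]
        have hlt : s.toNat < (List.replicate (n + 1) i).length := by simp; omega
        rw [List.getElem_append_left hlt, List.getElem_replicate, if_pos h, add_zero]
      · have hjge : (n:Int) + 1 ≤ min s (((List.replicate (n + 1) i ++ B).length : Int) - 1) := by
          rw [hlenT]; omega
        have hj0 : (0:Int) ≤ min s (((List.replicate (n + 1) i ++ B).length : Int) - 1) := by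
          omega
        have hjlt : min s (((List.replicate (n + 1) i ++ B).length : Int) - 1)
            < ((List.replicate (n + 1) i ++ B).length : Int) := by rw [hlenT]; omega
        rw [PySem.List.pyGetD_eq_getElem _ _ hj0 hjlt]
        have hrlen : (List.replicate (n + 1) i).length
            ≤ (min s (((List.replicate (n + 1) i ++ B).length : Int) - 1)).toNat := by
          simp only [List.length_replicate]; omega
        rw [List.getElem_append_right hrlen]
        have ihres := ih (i + 1) (s - PySem.Str.len l - 1) hne (by omega)
        have hmB0 : (0:Int) ≤ min (s - PySem.Str.len l - 1) ((B.length : Int) - 1) := by omega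
        have hmB1 : min (s - PySem.Str.len l - 1) ((B.length : Int) - 1) < (B.length : Int) := by
          omega
        rw [← hB, PySem.List.pyGetD_eq_getElem _ _ hmB0 hmB1] at ihres
        have hidxeq : (min s (((List.replicate (n + 1) i ++ B).length : Int) - 1)).toNat
              - (List.replicate (n + 1) i).length
            = (min (s - PySem.Str.len l - 1) ((B.length : Int) - 1)).toNat := by
          simp only [List.length_replicate]
          rw [hlenT] at hjge hj0 hjlt ⊢
          omega
        have hg := getElem_congr (rfl : B = B) hidxeq
          (by rw [hidxeq]; exact_mod_cast (by omega : (min (s - PySem.Str.len l - 1) ((B.length : Int) - 1)).toNat < B.length))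
        rw [hg, ihres, if_neg h]
        ring

theorem foldl_push {α β : Type} (f : List β → α → List β) (g : α → β)
    (h : ∀ a x, f a x = a ++ [g x]) : ∀ (xs : List α) (acc : List β),
    xs.foldl f acc = acc ++ xs.map g := by
  intro xs
  induction xs with
  | nil => intro acc; simp
  | cons x xs ih => intro acc; rw [List.foldl_cons, h, ih, List.append_assoc]; rfl

-- ===== VERDICT (by name: the statement is the Claim_ definition above) =====
theorem encode_token_labels_spec : Claim_equal_encode_token_labels := by
  intro code line_labels offsets _
  unfold Spec_encode_token_labels
  simp only [encode_token_labels, encode_token_labels_alt]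
  set ls := (PySem.Str.split? code "\n").getD [] with hls
  have hne : ls ≠ [] := split_ne_nil code
  rw [foldl_starts ls [] 0, foldl_ctl ls [] 0]
  simp only [List.nil_append]
  rw [foldl_push _
      (fun se : Int × Int =>
        if se.1 = 0 ∧ se.2 = 0 then (-100 : Int)
        else if 0 ≤ pyBisectRight (startsFrom 0 ls) se.1 - 1 ∧
                pyBisectRight (startsFrom 0 ls) se.1 - 1 < (line_labels.length : Int) then
          PySem.List.pyGetD line_labels (pyBisectRight (startsFrom 0 ls) se.1 - 1) 0
        else 0)
      (by intro a x; dsimp only; split_ifs <;> rfl),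
    foldl_push _
      (fun se : Int × Int =>
        if se.1 = 0 ∧ se.2 = 0 then (-100 : Int)
        else if 0 ≤ se.1 then
          if PySem.List.pyGetD (ctlFrom 0 ls) (min se.1 (((ctlFrom 0 ls).length : Int) - 1)) 0
              < (line_labels.length : Int) then
            PySem.List.pyGetD line_labels
              (PySem.List.pyGetD (ctlFrom 0 ls) (min se.1 (((ctlFrom 0 ls).length : Int) - 1)) 0) 0
          else 0
        else 0)
      (by intro a x; dsimp only; split_ifs <;> rfl)]
  simp only [List.nil_append]
  apply List.map_congr_left
  intro se _
  by_cases h00 : se.1 = 0 ∧ se.2 = 0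
  · simp [h00]
  · rw [if_neg h00, if_neg h00]
    by_cases hpos : 0 ≤ se.1
    · rw [if_pos hpos]
      have hlook := ctl_lookup ls 0 se.1 hne hpos
      rw [zero_add] at hlook
      rw [hlook]
      have hcnt : pyBisectRight (startsFrom 0 ls) se.1 - 1 = lineOf ls se.1 := by
        unfold pyBisectRight
        rw [countP_startsFrom_eq_lineOf ls se.1 hne hpos]
        ring
      rw [hcnt]
      have := lineOf_nonneg ls se.1
      by_cases hidx : lineOf ls se.1 < (line_labels.length : Int)
      · rw [if_pos ⟨this, hidx⟩, if_pos hidx]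
      · rw [if_neg (by tauto), if_neg hidx]
    · rw [if_neg hpos]
      have hcnt : (startsFrom 0 ls).countP (fun a => decide (a ≤ se.1)) = 0 :=
        countP_startsFrom_neg ls se.1 (by omega)
      unfold pyBisectRight
      rw [hcnt]
      norm_num
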